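-- pv_equiv track=rewrite | github.com/ferpjm/Algorithm-analysis-design | dyv1/caballerosYenemigosDyV.py | DyV
-- ===== SOURCE A (Python) =====
-- def DyV(enemigos, ini, fin, miFuerza):
--     if ini > fin:
--         return -1, 0
--
--     if ini == fin:
--         if enemigos[ini] <= miFuerza:
--             return ini, enemigos[ini]
--         else:
--             return -1, 0
--
--     mitad = (ini + fin) // 2
--     pos1, suma1 = DyV(enemigos, ini, mitad, miFuerza)
--     pos2, suma2 = DyV(enemigos, mitad + 1, fin, miFuerza)
--
--     if pos1 == -1 and pos2 == -1:
--         return -1, 0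
--     elif pos1 == -1:
--         return pos2, suma2
--     elif pos2 == -1:
--         return pos1, suma1
--     else:
--         return pos2, suma1 + suma2
-- ===== SOURCE B (Python) =====
-- def DyV(enemigos, ini, fin, miFuerza):
--     pos = -1
--     total = 0
--     for i in range(ini, fin + 1):
--         if enemigos[i] <= miFuerza:
--             pos = i
--             total += enemigos[i]
--     return pos, total
-- ===== Notes on version B (the rewrite author's own statement) =====
-- stated objective: simpler
-- what changed: Replaced the divide-and-conquer recursion and its four-way merge with a single flat left-to-right scan over the index range keeping (rightmost affordable index, running sum).
-- outside the precondition, e.g. on DyV([5, 2, 5, -4, 1], -2, -1, 3): A returns (-2, -4), B returns (-1, -3)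
import Mathlib
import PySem

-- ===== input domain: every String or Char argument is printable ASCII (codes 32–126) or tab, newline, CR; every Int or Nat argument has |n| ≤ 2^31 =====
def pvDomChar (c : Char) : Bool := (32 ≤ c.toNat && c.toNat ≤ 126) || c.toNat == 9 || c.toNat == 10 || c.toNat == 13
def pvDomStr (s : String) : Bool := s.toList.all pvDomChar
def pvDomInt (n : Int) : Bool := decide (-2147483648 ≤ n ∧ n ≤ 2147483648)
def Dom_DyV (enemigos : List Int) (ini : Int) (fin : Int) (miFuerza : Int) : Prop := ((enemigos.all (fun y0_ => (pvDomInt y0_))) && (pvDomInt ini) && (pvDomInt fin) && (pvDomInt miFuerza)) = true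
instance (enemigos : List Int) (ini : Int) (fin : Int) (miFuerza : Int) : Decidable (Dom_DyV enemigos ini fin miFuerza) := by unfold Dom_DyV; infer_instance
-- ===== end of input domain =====

-- B replaces A's divide-and-conquer recursion with one flat scan keeping (rightmost affordable index, running sum); equal return values on Pre_.

-- ===== PORT A =====
-- literal port of the recursive divide-and-conquer; 'enemigos[ini]' is pyGet?
-- (the IndexError case, none, is excluded by Pre_DyV; .getD 0 only fills the type there)
def DyV (enemigos : List Int) (ini : Int) (fin : Int) (miFuerza : Int) : Int × Int :=
  if ini > fin then (-1, 0)
  else if ini = fin then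
    let v := (PySem.List.pyGet? enemigos ini).getD 0
    if v ≤ miFuerza then (ini, v) else (-1, 0)
  else
    let mitad := PySem.Int.floordiv (ini + fin) 2
    let r1 := DyV enemigos ini mitad miFuerza
    let r2 := DyV enemigos (mitad + 1) fin miFuerza
    if r1.1 = -1 ∧ r2.1 = -1 then (-1, 0)
    else if r1.1 = -1 then (r2.1, r2.2)
    else if r2.1 = -1 then (r1.1, r1.2)
    else (r2.1, r1.2 + r2.2)
termination_by (fin - ini).toNat
decreasing_by
  · have h : PySem.Int.floordiv (ini + fin) 2 = (ini + fin) / 2 :=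
      PySem.Int.floordiv_eq_ediv_of_pos (by omega)
    omega
  · have h : PySem.Int.floordiv (ini + fin) 2 = (ini + fin) / 2 :=
      PySem.Int.floordiv_eq_ediv_of_pos (by omega)
    omega

-- ===== PORT B =====
-- one loop iteration of Source B: if enemigos[i] <= miFuerza: pos = i; total += enemigos[i]
def DyVstep (enemigos : List Int) (miFuerza : Int) (st : Int × Int) (i : Int) : Int × Int :=
  let v := (PySem.List.pyGet? enemigos i).getD 0
  if v ≤ miFuerza then (i, st.2 + v) else st

def DyV_alt (enemigos : List Int) (ini : Int) (fin : Int) (miFuerza : Int) : Int × Int :=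
  (PySem.List.pyRange ini (fin + 1) 1).foldl (DyVstep enemigos miFuerza) (-1, 0)

-- ===== PRECONDITION & SPEC =====
-- Pre_ excludes (a) ranges that make A index out of bounds (IndexError) and
-- (b) negative start indices ini, where A still returns but Python's negative-index
-- wraparound collides with A's -1 'not found' sentinel, so both A's and B's values
-- there are accidental artefacts no caller would specify.
def Pre_DyV (enemigos : List Int) (ini : Int) (fin : Int) (miFuerza : Int) : Prop :=
  ini > fin ∨ (0 ≤ ini ∧ fin < enemigos.length)
instance (enemigos : List Int) (ini : Int) (fin : Int) (miFuerza : Int) : Decidable (Pre_DyV enemigos ini fin miFuerza) := by unfold Pre_DyV; infer_instance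

def pvWitness_DyV : List Int × Int × Int × Int := ([3, 7, 2, 9], 0, 3, 5)

def Spec_DyV (enemigos : List Int) (ini : Int) (fin : Int) (miFuerza : Int) (out : Int × Int) : Prop := out = DyV_alt enemigos ini fin miFuerza
instance (enemigos : List Int) (ini : Int) (fin : Int) (miFuerza : Int) (out : Int × Int) : Decidable (Spec_DyV enemigos ini fin miFuerza out) := by unfold Spec_DyV; infer_instance

-- ===== CLAIM (what is proved, stated in full; the proofs are below) =====
def Claim_equal_DyV : Prop := ∀ (enemigos : List Int) (ini : Int) (fin : Int) (miFuerza : Int), Dom_DyV enemigos ini fin miFuerza → Pre_DyV enemigos ini fin miFuerza → Spec_DyV enemigos ini fin miFuerza (DyV enemigos ini fin miFuerza)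

-- ===== LEMMAS AND PROOFS =====

-- affordable test, last affordable index and sum of affordable values over a list of indices
def affP (enemigos : List Int) (miFuerza : Int) (i : Int) : Bool :=
  decide ((PySem.List.pyGet? enemigos i).getD 0 ≤ miFuerza)

def lastAff (enemigos : List Int) (miFuerza : Int) (l : List Int) : Option Int :=
  (l.filter (affP enemigos miFuerza)).getLast?

def sumAff (enemigos : List Int) (miFuerza : Int) (l : List Int) : Int :=
  ((l.filter (affP enemigos miFuerza)).map
    (fun i => (PySem.List.pyGet? enemigos i).getD 0)).sum

-- characterization of B's fold
lemma foldl_step_char (enemigos : List Int) (miFuerza : Int) :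
    ∀ (l : List Int) (p s : Int),
      l.foldl (DyVstep enemigos miFuerza) (p, s) =
        ((lastAff enemigos miFuerza l).getD p, s + sumAff enemigos miFuerza l) := by
  intro l
  induction l with
  | nil => intro p s; simp [lastAff, sumAff]
  | cons i t ih =>
    intro p s
    by_cases h : (PySem.List.pyGet? enemigos i).getD 0 ≤ miFuerza
    · simp only [List.foldl_cons, DyVstep, if_pos h, ih]
      have hf : (i :: t).filter (affP enemigos miFuerza) =
          i :: t.filter (affP enemigos miFuerza) := by
        simp [List.filter_cons, affP, h]
      refine Prod.ext_iff.mpr ⟨?_, ?_⟩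
      · simp only [lastAff, hf]
        cases hgl : (t.filter (affP enemigos miFuerza)).getLast? with
        | none =>
          have : t.filter (affP enemigos miFuerza) = [] := by
            simpa using hgl
          simp [this]
        | some j =>
          have hne : t.filter (affP enemigos miFuerza) ≠ [] := by
            intro hnil; rw [hnil] at hgl; simp at hgl
          rw [show (i :: t.filter (affP enemigos miFuerza)) =
                [i] ++ t.filter (affP enemigos miFuerza) from rfl,
              List.getLast?_append_of_ne_nil _ hne, hgl]
          simp [hgl]
      · simp only [sumAff, hf, List.map_cons, List.sum_cons]; ring
    · simp only [List.foldl_cons, DyVstep, if_neg h, ih]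
      have hf : (i :: t).filter (affP enemigos miFuerza) =
          t.filter (affP enemigos miFuerza) := by
        simp [List.filter_cons, affP, h]
      simp [lastAff, sumAff, hf]

lemma lastAff_none_sum (enemigos : List Int) (miFuerza : Int) (l : List Int)
    (h : lastAff enemigos miFuerza l = none) : sumAff enemigos miFuerza l = 0 := by
  have : l.filter (affP enemigos miFuerza) = [] := by simpa [lastAff] using h
  simp [sumAff, this]

lemma lastAff_mem (enemigos : List Int) (miFuerza : Int) (l : List Int) (j : Int)
    (h : lastAff enemigos miFuerza l = some j) : j ∈ l := by
  have := List.mem_of_getLast? (l := l.filter (affP enemigos miFuerza)) h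
  exact List.mem_of_mem_filter this

-- A equals the (last affordable, sum of affordable) characterization on Pre_
lemma DyV_char (enemigos : List Int) (miFuerza : Int) :
    ∀ (n : Nat) (ini fin : Int), (fin - ini).toNat ≤ n → 0 ≤ ini →
      fin < (enemigos.length : Int) →
      DyV enemigos ini fin miFuerza =
        ((lastAff enemigos miFuerza (PySem.List.pyRange ini (fin + 1) 1)).getD (-1),
         sumAff enemigos miFuerza (PySem.List.pyRange ini (fin + 1) 1)) := by
  intro n
  induction n with
  | zero =>
    intro ini fin hn h0 hlen
    have hle : fin ≤ ini := by omega
    rcases lt_or_eq_of_le hle with hlt | heq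
    · rw [DyV, if_pos hlt]
      have : PySem.List.pyRange ini (fin + 1) 1 = [] :=
        PySem.List.pyRange_one_eq_nil (by omega)
      simp [this, lastAff, sumAff]
    · subst heq
      rw [DyV, if_neg (by omega), if_pos rfl]
      have : PySem.List.pyRange fin (fin + 1) 1 = [fin] :=
        PySem.List.pyRange_one_singleton fin
      by_cases h : (PySem.List.pyGet? enemigos fin).getD 0 ≤ miFuerza
      · simp [this, lastAff, sumAff, affP, List.filter_cons, h]
      · simp [this, lastAff, sumAff, affP, List.filter_cons, h]
  | succ n ih =>
    intro ini fin hn h0 hlen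
    rcases lt_trichotomy ini fin with hlt | heq | hgt
    · -- ini < fin : the divide-and-conquer case
      rw [DyV, if_neg (by omega), if_neg (by omega)]
      have hmid : PySem.Int.floordiv (ini + fin) 2 = (ini + fin) / 2 :=
        PySem.Int.floordiv_eq_ediv_of_pos (by omega)
      set mitad := PySem.Int.floordiv (ini + fin) 2 with hm
      have hb1 : ini ≤ mitad := by omega
      have hb2 : mitad < fin := by omega
      have h1 := ih ini mitad (by omega) h0 (by omega)
      have h2 := ih (mitad + 1) fin (by omega) (by omega) hlen
      have hsplit : PySem.List.pyRange ini (fin + 1) 1 =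
          PySem.List.pyRange ini (mitad + 1) 1 ++ PySem.List.pyRange (mitad + 1) (fin + 1) 1 :=
        PySem.List.pyRange_one_append ini (mitad + 1) (fin + 1) (by omega) (by omega)
      simp only [h1, h2]
      set l1 := PySem.List.pyRange ini (mitad + 1) 1 with hl1
      set l2 := PySem.List.pyRange (mitad + 1) (fin + 1) 1 with hl2
      have hfapp : (l1 ++ l2).filter (affP enemigos miFuerza) =
          l1.filter (affP enemigos miFuerza) ++ l2.filter (affP enemigos miFuerza) :=
        List.filter_append ..
      have hsum : sumAff enemigos miFuerza (l1 ++ l2) =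
          sumAff enemigos miFuerza l1 + sumAff enemigos miFuerza l2 := by
        simp [sumAff, hfapp]
      have hpos1 : ∀ j, lastAff enemigos miFuerza l1 = some j → j ≠ -1 := by
        intro j hj
        have := lastAff_mem _ _ _ _ hj
        rw [hl1, PySem.List.mem_pyRange_one] at this
        omega
      have hpos2 : ∀ j, lastAff enemigos miFuerza l2 = some j → j ≠ -1 := by
        intro j hj
        have := lastAff_mem _ _ _ _ hj
        rw [hl2, PySem.List.mem_pyRange_one] at this
        omega
      cases hq1 : lastAff enemigos miFuerza l1 with
      | none =>
        have hs1 : sumAff enemigos miFuerza l1 = 0 := lastAff_none_sum _ _ _ hq1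
        have hnil1 : l1.filter (affP enemigos miFuerza) = [] := by
          simpa [lastAff] using hq1
        cases hq2 : lastAff enemigos miFuerza l2 with
        | none =>
          have hs2 : sumAff enemigos miFuerza l2 = 0 := lastAff_none_sum _ _ _ hq2
          have hnil2 : l2.filter (affP enemigos miFuerza) = [] := by
            simpa [lastAff] using hq2
          rw [if_pos (by simp [hq1, hq2])]
          rw [hsplit]
          simp [lastAff, hfapp, hnil1, hnil2, hsum, hs1, hs2, hq1, hq2]
        | some j2 =>
          rw [if_neg (by simp [hq2, hpos2 j2 hq2]), if_pos (by simp [hq1])]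
          rw [hsplit]
          have : lastAff enemigos miFuerza (l1 ++ l2) = some j2 := by
            simp only [lastAff, hfapp, hnil1, List.nil_append]
            simpa [lastAff] using hq2
          simp [this, hsum, hs1, hq2]
      | some j1 =>
        have hne1 : l1.filter (affP enemigos miFuerza) ≠ [] := by
          intro hnil; simp [lastAff, hnil] at hq1
        cases hq2 : lastAff enemigos miFuerza l2 with
        | none =>
          have hs2 : sumAff enemigos miFuerza l2 = 0 := lastAff_none_sum _ _ _ hq2
          have hnil2 : l2.filter (affP enemigos miFuerza) = [] := by
            simpa [lastAff] using hq2
          rw [if_neg (by simp [hq1, hpos1 j1 hq1]),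
              if_neg (by simp [hq1, hpos1 j1 hq1]), if_pos (by simp [hq2])]
          rw [hsplit]
          have : lastAff enemigos miFuerza (l1 ++ l2) = some j1 := by
            simp only [lastAff, hfapp, hnil2, List.append_nil]
            simpa [lastAff] using hq1
          simp [this, hsum, hs2, hq1]
        | some j2 =>
          rw [if_neg (by simp [hq1, hpos1 j1 hq1]),
              if_neg (by simp [hq1, hpos1 j1 hq1]),
              if_neg (by simp [hq2, hpos2 j2 hq2])]
          rw [hsplit]
          have hne2 : l2.filter (affP enemigos miFuerza) ≠ [] := by
            intro hnil; simp [lastAff, hnil] at hq2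
          have : lastAff enemigos miFuerza (l1 ++ l2) = some j2 := by
            simp only [lastAff, hfapp]
            rw [List.getLast?_append_of_ne_nil _ hne2]
            simpa [lastAff] using hq2
          simp [this, hsum, hq1, hq2]
    · -- ini = fin
      subst heq
      rw [DyV, if_neg (by omega), if_pos rfl]
      have : PySem.List.pyRange ini (ini + 1) 1 = [ini] :=
        PySem.List.pyRange_one_singleton ini
      by_cases h : (PySem.List.pyGet? enemigos ini).getD 0 ≤ miFuerza
      · simp [this, lastAff, sumAff, affP, List.filter_cons, h]
      · simp [this, lastAff, sumAff, affP, List.filter_cons, h]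
    · -- ini > fin
      rw [DyV, if_pos hgt]
      have : PySem.List.pyRange ini (fin + 1) 1 = [] :=
        PySem.List.pyRange_one_eq_nil (by omega)
      simp [this, lastAff, sumAff]

-- ===== VERDICT (by name: the statement is the Claim_ definition above) =====
theorem DyV_spec : Claim_equal_DyV := by
  intro enemigos ini fin miFuerza _hdom hpre
  unfold Spec_DyV DyV_alt
  rcases hpre with hgt | ⟨h0, hlen⟩
  · rw [DyV, if_pos hgt]
    have : PySem.List.pyRange ini (fin + 1) 1 = [] :=
      PySem.List.pyRange_one_eq_nil (by omega)
    simp [this]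
  · rw [foldl_step_char,
        DyV_char enemigos miFuerza (fin - ini).toNat ini fin le_rfl h0 (by exact_mod_cast hlen)]
    simp
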